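-- pv_equiv track=rewrite | github.com/wuc567/Pattern-Mining | OWSP-Miner/Python/Miner.py | diguipd
-- ===== SOURCE A (Python) =====
-- def pdR(s,R):
--     for i in s:
--         if i not in R:
--             return False
--     return True
--
-- def diguipd(k,sample,R):
--     sup = 0
--     m = [[-1] for i in range(len(sample))]
--     ll = 0
--     i = 0
--     while i < len(k):
--         l = 0
--         for j in range(len(sample) - 1, -1, -1):
--             if j == 0 and k[i] == sample[j]:
--                 m[j][ll] = i
--             elif k[i] == sample[j] and j != 0 and m[j - 1][ll] != -1 and m[j][ll] == -1:
--                 if pdR(k[m[j - 1][ll] + 1:i], R) or m[j - 1][ll] + 1 == i: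
--                     m[j][ll] = i
--                 else:
--                     i = i - 1
--                     l = 1
--                 break
--         if l == 1 or m[len(sample) - 1][ll] != -1:
--             for j in range(len(sample)):
--                 m[j].append(-1)
--             if m[len(sample) - 1][ll] != -1:
--                 sup = sup + 1
--             ll = ll + 1
--         i = i + 1
--     return sup
-- ===== SOURCE B (Python) =====
-- def diguipd(k, sample, R):
--     n = len(sample)
--     Rset = set(R)
--     # bad[t] = number of positions < t whose element is outside R (prefix counts)
--     bad = [0]
--     for x in k:
--         bad.append(bad[-1] + (0 if x in Rset else 1))
--     cur = [-1] * n
--     sup = 0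
--     for i, x in enumerate(k):
--         j = None
--         for jj in range(n - 1, 0, -1):
--             if x == sample[jj] and cur[jj - 1] != -1 and cur[jj] == -1:
--                 j = jj
--                 break
--         if j is None:
--             if x == sample[0]:
--                 cur[0] = i
--         else:
--             p = cur[j - 1] + 1
--             if p == i or bad[i] == bad[p]:
--                 cur[j] = i
--             else:
--                 cur = [-1] * n
--                 if x == sample[0]:
--                     cur[0] = i
--         if cur[n - 1] != -1:
--             sup += 1
--             cur = [-1] * n
--     return sup
-- ===== Notes on version B (the rewrite author's own statement) =====
-- stated objective: alternative
-- what changed: B replaces A's per-step pdR slice rescan by a once-built prefix-count array of out-of-R positions (an O(1) gap test, with R as a set) and keeps only the current occurrence column instead of A's ever-growing 2D matrix m, scanning k once forward.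
import Mathlib
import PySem

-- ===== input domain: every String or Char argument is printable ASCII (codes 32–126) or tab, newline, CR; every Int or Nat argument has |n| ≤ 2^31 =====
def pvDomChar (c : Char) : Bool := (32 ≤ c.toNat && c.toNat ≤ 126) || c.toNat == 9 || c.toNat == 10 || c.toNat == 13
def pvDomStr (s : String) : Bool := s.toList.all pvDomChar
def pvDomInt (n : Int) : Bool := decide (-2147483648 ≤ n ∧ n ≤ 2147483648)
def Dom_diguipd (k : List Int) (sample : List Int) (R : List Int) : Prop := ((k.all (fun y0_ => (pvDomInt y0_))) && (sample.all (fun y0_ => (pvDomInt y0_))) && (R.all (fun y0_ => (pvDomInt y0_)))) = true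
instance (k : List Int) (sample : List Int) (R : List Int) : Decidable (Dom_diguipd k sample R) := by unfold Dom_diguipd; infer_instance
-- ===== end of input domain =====

-- B replaces A's per-step pdR slice rescans by a once-built prefix-count array of out-of-R positions
-- (an O(1) gap test, R as a set) and keeps only the current occurrence column instead of A's growing 2D matrix.

-- ===== PORT A =====
def pdR_port (s : List Int) (R : List Int) : Bool :=
  s.all (fun x => R.contains x)

-- m[j][ll] (indices always in range on admitted inputs)
def mgetA (m : List (List Int)) (j ll : Nat) : Int := (m.getD j []).getD ll (-1)
-- m[j][ll] = v
def msetA (m : List (List Int)) (j ll : Nat) (v : Int) : List (List Int) :=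
  m.set j ((m.getD j []).set ll v)

-- the inner `for j in range(len(sample)-1, -1, -1)` loop; fuel j+1 means current index j;
-- returns (m, l) where l=true is Python's `l = 1` (gap failure, i will be re-processed)
def innerA (k sample R : List Int) (i ll : Nat) : Nat → List (List Int) → List (List Int) × Bool
  | 0, m => (m, false)
  | j+1, m =>
    if j = 0 ∧ k.getD i 0 = sample.getD j 0 then
      innerA k sample R i ll j (msetA m j ll (Int.ofNat i))
    else if k.getD i 0 = sample.getD j 0 ∧ j ≠ 0 ∧ mgetA m (j-1) ll ≠ -1 ∧ mgetA m j ll = -1 then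
      if pdR_port (PySem.List.slice k (some (mgetA m (j-1) ll + 1)) (some (Int.ofNat i))) R = true
         ∨ mgetA m (j-1) ll + 1 = Int.ofNat i then
        (msetA m j ll (Int.ofNat i), false)
      else
        (m, true)
    else innerA k sample R i ll j m

-- the outer `while i < len(k)` loop; each i is processed at most twice, so fuel 2*len(k)+1 is never exhausted
def outerA (k sample R : List Int) : Nat → Nat → Nat → List (List Int) → Int → Int
  | 0, _, _, _, sup => sup
  | fuel+1, i, ll, m, sup =>
    if i < k.length then
      match innerA k sample R i ll sample.length m with
      | (m1, l) =>
        if l = true ∨ mgetA m1 (sample.length - 1) ll ≠ -1 then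
          let m2 := m1.map (fun row => row ++ [-1])
          let sup2 := if mgetA m2 (sample.length - 1) ll ≠ -1 then sup + 1 else sup
          outerA k sample R fuel (if l = true then i else i + 1) (ll + 1) m2 sup2
        else
          outerA k sample R fuel (i + 1) ll m1 sup
    else sup

def diguipd (k : List Int) (sample : List Int) (R : List Int) : Int :=
  outerA k sample R (2 * k.length + 1) 0 0 (List.replicate sample.length [-1]) 0

-- ===== PORT B =====
-- prefix counts: (0 :: buildBad Rset k 0).getD t = number of positions < t of k outside Rset
def buildBad (Rset : PySem.Set Int) : List Int → Int → List Int
  | [], _ => []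
  | x :: t, b =>
    let b' := b + (if PySem.Set.contains Rset x then 0 else 1)
    b' :: buildBad Rset t b'

-- `for jj in range(n-1, 0, -1): … break` — first jj (descending, jj ≥ 1) that can extend the occurrence
def findJ (sample cur : List Int) (x : Int) : Nat → Option Nat
  | 0 => none
  | jc+1 =>
    if x = sample.getD (jc+1) 0 ∧ cur.getD jc (-1) ≠ -1 ∧ cur.getD (jc+1) (-1) = -1 then
      some (jc+1)
    else findJ sample cur x jc

-- `for i, x in enumerate(k)` over the current column cur and support counter
def loopB (sample bad : List Int) (n : Nat) : List (Int × Int) → List Int → Int → Int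
  | [], _, sup => sup
  | (i, x) :: rest, cur, sup =>
    let cur1 :=
      match findJ sample cur x (n - 1) with
      | none => if x = sample.getD 0 0 then cur.set 0 i else cur
      | some j =>
        let p := cur.getD (j-1) (-1) + 1
        if p = i ∨ PySem.List.pyGetD bad i 0 = PySem.List.pyGetD bad p 0 then
          cur.set j i
        else
          let c := List.replicate n (-1 : Int)
          if x = sample.getD 0 0 then c.set 0 i else c
    if cur1.getD (n-1) (-1) ≠ -1 then
      loopB sample bad n rest (List.replicate n (-1)) (sup + 1)
    else
      loopB sample bad n rest cur1 sup

def diguipd_alt (k : List Int) (sample : List Int) (R : List Int) : Int :=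
  let n := sample.length
  let Rset := PySem.Set.ofList R
  let bad := (0 : Int) :: buildBad Rset k 0
  loopB sample bad n (PySem.List.enumerate k 0) (List.replicate n (-1)) 0

-- ===== PRECONDITION & SPEC =====
-- Pre_ excludes exactly the inputs where A raises (IndexError on m[-1] when sample is empty and k is not).
def Pre_diguipd (k : List Int) (sample : List Int) (R : List Int) : Prop := sample ≠ [] ∨ k = []
instance (k : List Int) (sample : List Int) (R : List Int) : Decidable (Pre_diguipd k sample R) := by
  unfold Pre_diguipd; infer_instance

def pvWitness_diguipd : List Int × List Int × List Int := ([1, 2, 3, 1, 2], [1, 2], [3])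

def Spec_diguipd (k : List Int) (sample : List Int) (R : List Int) (out : Int) : Prop := out = diguipd_alt k sample R
instance (k : List Int) (sample : List Int) (R : List Int) (out : Int) : Decidable (Spec_diguipd k sample R out) := by unfold Spec_diguipd; infer_instance

-- ===== CLAIM (what is proved, stated in full; the proofs are below) =====
def Claim_equal_diguipd : Prop := ∀ (k : List Int) (sample : List Int) (R : List Int), Dom_diguipd k sample R → Pre_diguipd k sample R → Spec_diguipd k sample R (diguipd k sample R)

-- ===== LEMMAS AND PROOFS =====

-- column ll of the matrix m, as the plain list B maintains
def colm (m : List (List Int)) (ll : Nat) : List Int := m.map (fun row => row.getD ll (-1))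

theorem getD_replicate' (n j : Nat) (c : Int) : (List.replicate n c).getD j c = c := by
  induction n generalizing j with
  | zero => simp [List.getD]
  | succ n ih => cases j <;> simp [List.replicate_succ, ih]

theorem colm_getD (m : List (List Int)) (j ll : Nat) :
    mgetA m j ll = (colm m ll).getD j (-1) := by
  induction m generalizing j with
  | nil => simp [mgetA, colm, List.getD]
  | cons r t ih => cases j <;> simp [mgetA, colm, List.getD] <;> simpa [mgetA, colm] using ih _

theorem colm_set (m : List (List Int)) (j ll : Nat) (v : Int)
    (hj : j < m.length) (hl : ll < (m.getD j []).length) :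
    colm (msetA m j ll v) ll = (colm m ll).set j v := by
  induction m generalizing j with
  | nil => simp at hj
  | cons r t ih =>
    cases j with
    | zero =>
      simp [msetA, colm] at *
      rw [List.getElem?_set_self (by simpa using hl)]
      simp
    | succ j =>
      simp [msetA, colm] at *
      simpa [msetA, colm] using ih j hj hl

theorem colm_append (m : List (List Int)) (ll : Nat) (h : ∀ row ∈ m, row.length = ll + 1) :
    colm (m.map (fun row => row ++ [-1])) (ll + 1) = List.replicate m.length (-1) := by
  induction m with
  | nil => simp [colm]
  | cons r t ih =>
    have hr := h r (by simp)
    simp [colm, List.replicate_succ] at *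
    constructor
    · have : (r ++ [(-1 : Int)]).getD (ll+1) (-1) = -1 := by
        rw [List.getD_eq_getElem?_getD, List.getElem?_append_right (by omega)]
        simp [hr]
      simpa [hr] using this
    · simpa [colm] using ih (fun row hrow => h.2 row hrow)

theorem colm_append_old (m : List (List Int)) (j ll : Nat) (h : ∀ row ∈ m, row.length = ll + 1) :
    mgetA (m.map (fun row => row ++ [-1])) j ll = mgetA m j ll := by
  induction m generalizing j with
  | nil => simp [mgetA]
  | cons r t ih =>
    cases j with
    | zero =>
      have hr := h r (by simp)
      have he : (r ++ [(-1:Int)])[ll]? = r[ll]? := List.getElem?_append_left (by omega)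
      simp [mgetA, he]
    | succ j => simpa [mgetA] using ih j (fun row hrow => h row (List.mem_cons_of_mem _ hrow))

theorem getD_ne_mem (cur : List Int) (p : Nat) (h : cur.getD p (-1) ≠ -1) :
    cur.getD p (-1) ∈ cur := by
  rcases Nat.lt_or_ge p cur.length with hp | hp
  · rw [List.getD_eq_getElem _ _ hp]; exact List.getElem_mem hp
  · exact absurd (by simp [List.getD_eq_getElem?_getD, List.getElem?_eq_none hp]) h

theorem findJ_none_replicate (sample : List Int) (n : Nat) (x : Int) (t : Nat) :
    findJ sample (List.replicate n (-1)) x t = none := by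
  induction t with
  | zero => rfl
  | succ jc ih => simp [findJ, getD_replicate', ih]

theorem findJ_some (sample cur : List Int) (x : Int) (t j : Nat)
    (h : findJ sample cur x t = some j) :
    1 ≤ j ∧ j ≤ t ∧ x = sample.getD j 0 ∧ cur.getD (j-1) (-1) ≠ -1 ∧ cur.getD j (-1) = -1 := by
  induction t with
  | zero => simp [findJ] at h
  | succ jc ih =>
    rw [findJ] at h
    split_ifs at h with hc
    · cases h; exact ⟨by omega, by omega, hc.1, by simpa using hc.2.1, hc.2.2⟩
    · have := ih h; exact ⟨this.1, by omega, this.2.2⟩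

theorem inner_eq (k sample R : List Int) (i ll : Nat) (m : List (List Int)) (t : Nat) :
    innerA k sample R i ll (t+1) m =
      (match findJ sample (colm m ll) (k.getD i 0) t with
       | none =>
         if k.getD i 0 = sample.getD 0 0 then (msetA m 0 ll (Int.ofNat i), false) else (m, false)
       | some j =>
         if pdR_port (PySem.List.slice k (some ((colm m ll).getD (j-1) (-1) + 1)) (some (Int.ofNat i))) R = true
            ∨ (colm m ll).getD (j-1) (-1) + 1 = Int.ofNat i then
           (msetA m j ll (Int.ofNat i), false)
         else (m, true)) := by
  induction t with
  | zero =>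
    rw [innerA, findJ]
    by_cases h0 : k.getD i 0 = sample.getD 0 0
    · simp [h0, innerA]
    · simp [h0, innerA]
  | succ jc ih =>
    rw [innerA]
    conv_rhs => rw [findJ]
    simp only [Nat.add_sub_cancel, colm_getD]
    by_cases hc : k.getD i 0 = sample.getD (jc+1) 0 ∧ (colm m ll).getD jc (-1) ≠ -1 ∧ (colm m ll).getD (jc+1) (-1) = -1
    · have hA : ¬ (jc + 1 = 0 ∧ k.getD i 0 = sample.getD (jc+1) 0) := by omega
      rw [if_neg hA, if_pos ⟨hc.1, by omega, hc.2.1, hc.2.2⟩, if_pos hc]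
      simp [Nat.add_sub_cancel]
    · have hA : ¬ (jc + 1 = 0 ∧ k.getD i 0 = sample.getD (jc+1) 0) := by omega
      have hc' : ¬ (k.getD i 0 = sample.getD (jc+1) 0 ∧ jc + 1 ≠ 0 ∧
          (colm m ll).getD jc (-1) ≠ -1 ∧ (colm m ll).getD (jc+1) (-1) = -1) :=
        fun hx => hc ⟨hx.1, hx.2.2.1, hx.2.2.2⟩
      rw [if_neg hA, if_neg hc', if_neg hc]
      exact ih

theorem buildBad_getD (Rset : PySem.Set Int) (xs : List Int) (b : Int) (t : Nat) (ht : t ≤ xs.length) :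
    ((b :: buildBad Rset xs b).getD t 0)
      = b + ((xs.take t).countP (fun x => !PySem.Set.contains Rset x) : Int) := by
  induction xs generalizing b t with
  | nil =>
    cases t with
    | zero => simp
    | succ t => simp at ht
  | cons x xs' ih =>
    cases t with
    | zero => simp
    | succ t =>
      have : (b :: buildBad Rset (x :: xs') b).getD (t+1) 0
          = ((b + (if PySem.Set.contains Rset x then 0 else 1)) :: buildBad Rset xs'
              (b + (if PySem.Set.contains Rset x then 0 else 1))).getD t 0 := by
        simp [buildBad]
      rw [this, ih _ t (by simpa using ht)]
      simp [List.countP_cons]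
      split_ifs <;> push_cast <;> ring

theorem gap_iff (k R : List Int) (vn i : Nat) (hv : vn < i) (hi : i ≤ k.length) :
    ((pdR_port (PySem.List.slice k (some ((vn:Int) + 1)) (some ((i:Int)))) R = true) ∨ ((vn:Int) + 1 = (i:Int)))
    ↔ (((vn:Int) + 1 = (i:Int)) ∨
       PySem.List.pyGetD ((0:Int) :: buildBad (PySem.Set.ofList R) k 0) ((i:Int)) 0
         = PySem.List.pyGetD ((0:Int) :: buildBad (PySem.Set.ofList R) k 0) ((vn:Int)+1) 0) := by
  have hcast : ((vn:Int)+1) = (((vn+1 : Nat)) : Int) := by push_cast; ring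
  have hseg : (k.take i).drop (vn+1) = (k.drop (vn+1)).take (i - (vn+1)) := List.drop_take ..
  have hsplit : k.take i = k.take (vn+1) ++ (k.take i).drop (vn+1) := by
    conv_lhs => rw [← List.take_append_drop (vn+1) (k.take i)]
    rw [List.take_take, min_eq_left (by omega)]
  have hB : (PySem.List.pyGetD ((0:Int) :: buildBad (PySem.Set.ofList R) k 0) ((i:Int)) 0
         = PySem.List.pyGetD ((0:Int) :: buildBad (PySem.Set.ofList R) k 0) ((vn:Int)+1) 0)
      ↔ ∀ x ∈ (k.drop (vn+1)).take (i - (vn+1)), x ∈ R := by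
    rw [hcast, PySem.List.pyGetD_natCast, PySem.List.pyGetD_natCast,
        buildBad_getD _ _ _ _ hi, buildBad_getD _ _ _ _ (by omega)]
    have hcnt : (k.take i).countP (fun x => !PySem.Set.contains (PySem.Set.ofList R) x)
        = (k.take (vn+1)).countP (fun x => !PySem.Set.contains (PySem.Set.ofList R) x)
          + ((k.drop (vn+1)).take (i-(vn+1))).countP (fun x => !PySem.Set.contains (PySem.Set.ofList R) x) := by
      conv_lhs => rw [hsplit]
      rw [List.countP_append, hseg]
    rw [hcnt]
    constructor
    · intro h x hx
      have h0 : ((k.drop (vn+1)).take (i-(vn+1))).countP (fun x => !PySem.Set.contains (PySem.Set.ofList R) x) = 0 := by omega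
      rw [List.countP_eq_zero] at h0
      have := h0 x hx
      simpa [PySem.Set.mem_ofList] using this
    · intro h
      have h0 : ((k.drop (vn+1)).take (i-(vn+1))).countP (fun x => !PySem.Set.contains (PySem.Set.ofList R) x) = 0 :=
        List.countP_eq_zero.mpr (fun x hx => by simpa [PySem.Set.mem_ofList] using h x hx)
      omega
  have hA : (pdR_port (PySem.List.slice k (some ((vn:Int) + 1)) (some ((i:Int)))) R = true)
      ↔ ∀ x ∈ (k.drop (vn+1)).take (i - (vn+1)), x ∈ R := by
    rw [hcast, PySem.List.slice_natCast, pdR_port]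
    simp [List.all_eq_true]
  rw [hA, hB]
  tauto

theorem length_msetA (m : List (List Int)) (j ll : Nat) (v : Int) :
    (msetA m j ll v).length = m.length := by simp [msetA]

theorem rows_msetA (m : List (List Int)) (j ll : Nat) (v : Int) (hj : j < m.length)
    (h : ∀ row ∈ m, row.length = ll + 1) :
    ∀ row ∈ msetA m j ll v, row.length = ll + 1 := by
  intro row hrow
  rcases List.mem_or_eq_of_mem_set hrow with h1 | h1
  · exact h _ h1
  · subst h1
    rw [List.length_set]
    exact h _ (by rw [List.getD_eq_getElem _ _ hj]; exact List.getElem_mem hj)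

theorem bound_set (cur : List Int) (i j : Nat) (h : ∀ v ∈ cur, -1 ≤ v ∧ v < (i:Int)) :
    ∀ v ∈ cur.set j ((i : Nat) : Int), -1 ≤ v ∧ v < ((i + 1 : Nat) : Int) := by
  intro v hv
  rcases List.mem_or_eq_of_mem_set hv with h1 | h1
  · have := h v h1; push_cast at *; omega
  · subst h1; push_cast; omega

theorem main_eq (k sample R : List Int) (hn : sample ≠ []) :
    ∀ (d i ll : Nat) (m : List (List Int)) (sup : Int) (fuel : Nat),
      i + d = k.length → 2*d + 1 ≤ fuel →
      m.length = sample.length →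
      (∀ row ∈ m, row.length = ll + 1) →
      (∀ v ∈ colm m ll, -1 ≤ v ∧ v < (i:Int)) →
      (colm m ll).getD (sample.length - 1) (-1) = -1 →
      outerA k sample R fuel i ll m sup
        = loopB sample ((0:Int) :: buildBad (PySem.Set.ofList R) k 0) sample.length
            (PySem.List.enumerate (k.drop i) (i:Int)) (colm m ll) sup := by
  intro d
  induction d with
  | zero =>
    intro i ll m sup fuel hd hfuel hml hrows hbound hlast
    obtain ⟨f, rfl⟩ : ∃ f, fuel = f + 1 := ⟨fuel - 1, by omega⟩
    rw [show k.drop i = [] from by rw [List.drop_eq_nil_iff]; omega]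
    simp only [outerA, PySem.List.enumerate_nil, loopB, if_neg (show ¬ i < k.length by omega)]
  | succ d ih =>
    intro i ll m sup fuel hd hfuel hml hrows hbound hlast
    have hi : i < k.length := by omega
    obtain ⟨f, rfl⟩ : ∃ f, fuel = f + 1 := ⟨fuel - 1, by omega⟩
    obtain ⟨t, htn⟩ : ∃ t, sample.length = t + 1 :=
      ⟨sample.length - 1, by cases sample with | nil => simp at hn | cons a l => simp⟩
    have hkd : k.getD i 0 = k[i] := List.getD_eq_getElem _ _ hi
    have hrowlen : ∀ j, j < m.length → ll < (m.getD j []).length := by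
      intro j hj
      rw [List.getD_eq_getElem _ _ hj, hrows _ (List.getElem_mem hj)]
      omega
    -- the common continuation after a non-failing inner pass
    have hpost : ∀ (ll' : Nat) (m1 : List (List Int)) (f' : Nat), 2*d + 1 ≤ f' →
        m1.length = t + 1 → (∀ row ∈ m1, row.length = ll' + 1) →
        (∀ v ∈ colm m1 ll', -1 ≤ v ∧ v < ((i+1 : Nat):Int)) →
        (if (false = true ∨ mgetA m1 t ll' ≠ -1) then
           outerA k sample R f' (i+1) (ll'+1) (m1.map (fun row => row ++ [-1]))
             (if mgetA (m1.map (fun row => row ++ [-1])) t ll' ≠ -1 then sup + 1 else sup)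
         else outerA k sample R f' (i+1) ll' m1 sup)
        = (if (colm m1 ll').getD t (-1) ≠ -1 then
             loopB sample ((0:Int) :: buildBad (PySem.Set.ofList R) k 0) (t+1)
               (PySem.List.enumerate (k.drop (i+1)) ((i:Int)+1)) (List.replicate (t+1) (-1)) (sup + 1)
           else loopB sample ((0:Int) :: buildBad (PySem.Set.ofList R) k 0) (t+1)
               (PySem.List.enumerate (k.drop (i+1)) ((i:Int)+1)) (colm m1 ll') sup) := by
      intro ll' m1 f' hf' hm1 hrows1 hbound1
      have hcast1 : ((i:Int)+1) = ((i+1 : Nat) : Int) := by push_cast; ring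
      have hmap : mgetA (m1.map (fun row => row ++ [-1])) t ll'
          = mgetA m1 t ll' := colm_append_old _ _ _ hrows1
      by_cases hl : (colm m1 ll').getD t (-1) ≠ -1
      · rw [if_pos (Or.inr (by rw [colm_getD]; exact hl)), if_pos hl, if_pos (by rw [hmap, colm_getD]; exact hl)]
        rw [hcast1, ih (i+1) (ll'+1) (m1.map (fun row => row ++ [-1])) (sup+1) f' (by omega) (by omega)
              (by simpa using hm1.trans htn.symm)
              (by intro row hrow; obtain ⟨r0, hr0, rfl⟩ := List.mem_map.mp hrow; simp [hrows1 _ hr0])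
              (by rw [colm_append m1 ll' hrows1]; intro v hv
                  have hveq := List.eq_of_mem_replicate hv
                  subst hveq
                  exact ⟨by omega, by omega⟩)
              (by rw [colm_append m1 ll' hrows1, htn, Nat.add_sub_cancel, getD_replicate'])]
        rw [colm_append m1 ll' hrows1, hm1, htn]
      · rw [if_neg (by simpa [colm_getD] using hl), if_neg hl]
        rw [hcast1, ih (i+1) ll' m1 sup f' (by omega) (by omega) (hm1.trans htn.symm) hrows1 hbound1
              (by rw [htn, Nat.add_sub_cancel]; simpa using hl)]
        rw [htn]
    -- one step of both loops
    rw [htn] at hlast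
    simp only [Nat.add_sub_cancel] at hlast
    rw [List.drop_eq_getElem_cons hi, PySem.List.enumerate_cons]
    simp only [outerA, loopB]
    rw [if_pos hi, htn]
    simp only [Nat.add_sub_cancel]
    rw [inner_eq k sample R i ll m t]
    simp only [Int.ofNat_eq_natCast, hkd]
    rcases hF : findJ sample (colm m ll) k[i] t with _ | j
    · simp only [hF]
      by_cases h0 : k[i] = sample.getD 0 0
      · rw [if_pos h0]
        dsimp only
        rw [if_neg Bool.false_ne_true]
        have h0m : 0 < m.length := by omega
        rw [hpost ll (msetA m 0 ll ((i:Nat):Int)) f (by omega)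
              (by rw [length_msetA, hml, htn])
              (rows_msetA m 0 ll _ h0m hrows)
              (by rw [colm_set m 0 ll _ h0m (hrowlen 0 h0m)]; exact bound_set _ i 0 hbound),
            colm_set m 0 ll _ h0m (hrowlen 0 h0m)]
        all_goals (first | rfl | (split_ifs <;> first | rfl | tauto))
      · rw [if_neg h0]
        dsimp only
        rw [if_neg Bool.false_ne_true]
        rw [hpost ll m f (by omega) (hml.trans htn) hrows
              (fun v hv => ⟨(hbound v hv).1, by have := (hbound v hv).2; push_cast at *; omega⟩)]
        all_goals (first | rfl | (split_ifs <;> first | rfl | tauto))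
    · simp only [hF]
      obtain ⟨hj1, hjt, hxj, hcur1, hcurj⟩ := findJ_some _ _ _ _ _ hF
      have hvmem := getD_ne_mem _ _ hcur1
      obtain ⟨hv1, hv2⟩ := hbound _ hvmem
      have hv0 : 0 ≤ (colm m ll).getD (j-1) (-1) := by
        rcases lt_or_ge ((colm m ll).getD (j-1) (-1)) 0 with h | h
        · exact absurd (by omega) hcur1
        · exact h
      obtain ⟨vn, hvn⟩ : ∃ vn : Nat, (colm m ll).getD (j-1) (-1) = (vn : Int) :=
        ⟨((colm m ll).getD (j-1) (-1)).toNat, (Int.toNat_of_nonneg hv0).symm⟩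
      have hvni : vn < i := by rw [hvn] at hv2; exact_mod_cast hv2
      simp only [hvn]
      have hgap := gap_iff k R vn i hvni (by omega)
      by_cases hg : ((vn:Int) + 1 = (i:Int)) ∨
          PySem.List.pyGetD ((0:Int) :: buildBad (PySem.Set.ofList R) k 0) ((i:Int)) 0
            = PySem.List.pyGetD ((0:Int) :: buildBad (PySem.Set.ofList R) k 0) ((vn:Int)+1) 0
      · rw [if_pos (hgap.mpr hg), if_pos hg]
        dsimp only
        rw [if_neg Bool.false_ne_true]
        have hjm : j < m.length := by omega
        rw [hpost ll (msetA m j ll ((i:Nat):Int)) f (by omega)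
              (by rw [length_msetA, hml, htn])
              (rows_msetA m j ll _ hjm hrows)
              (by rw [colm_set m j ll _ hjm (hrowlen j hjm)]; exact bound_set _ i j hbound),
            colm_set m j ll _ hjm (hrowlen j hjm)]
        all_goals (first | rfl | (split_ifs <;> first | rfl | tauto))
      · rw [if_neg (fun h => hg (hgap.mp h)), if_neg hg]
        dsimp only
        rw [if_pos (show (true = true ∨ mgetA m t ll ≠ -1) from Or.inl rfl)]
        rw [if_pos (show true = true from rfl)]
        have hm2get : mgetA (m.map (fun row => row ++ [-1])) t ll = (-1 : Int) := by
          rw [colm_append_old m t ll hrows, colm_getD]; exact hlast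
        rw [if_neg (by rw [hm2get]; simp)]
        obtain ⟨f', rfl⟩ : ∃ f', f = f' + 1 := ⟨f - 1, by omega⟩
        simp only [outerA]
        rw [if_pos hi, htn]
        simp only [Nat.add_sub_cancel]
        rw [inner_eq k sample R i (ll+1) _ t]
        simp only [Int.ofNat_eq_natCast, hkd]
        have hcolm2 : colm (m.map (fun row => row ++ [-1])) (ll+1) = List.replicate (t+1) (-1) := by
          rw [colm_append m ll hrows, hml, htn]
        rw [hcolm2, findJ_none_replicate]
        dsimp only
        have hrows2 : ∀ row ∈ m.map (fun row => row ++ [-1]), row.length = (ll+1) + 1 := by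
          intro row hrow
          obtain ⟨r0, hr0, rfl⟩ := List.mem_map.mp hrow
          simp [hrows _ hr0]
        have hlen2 : (m.map (fun row => row ++ [-1])).length = t + 1 := by
          rw [List.length_map, hml, htn]
        have h0m2 : 0 < (m.map (fun row => row ++ [-1])).length := by omega
        have hrl2 : ll + 1 < ((m.map (fun row => row ++ [-1])).getD 0 []).length := by
          rw [List.getD_eq_getElem _ _ h0m2, hrows2 _ (List.getElem_mem h0m2)]
          omega
        by_cases h0 : k[i] = sample.getD 0 0
        · rw [if_pos h0]
          dsimp only
          rw [if_neg Bool.false_ne_true]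
          rw [hpost (ll+1) (msetA (m.map (fun row => row ++ [-1])) 0 (ll+1) ((i:Nat):Int)) f' (by omega)
                (by rw [length_msetA, hlen2])
                (rows_msetA _ 0 (ll+1) _ h0m2 hrows2)
                (by rw [colm_set _ 0 (ll+1) _ h0m2 hrl2, hcolm2]
                    exact bound_set _ i 0 (fun v hv => by
                      have hveq := List.eq_of_mem_replicate hv
                      subst hveq; exact ⟨by omega, by omega⟩)),
              colm_set _ 0 (ll+1) _ h0m2 hrl2, hcolm2]
          all_goals (first | rfl | (split_ifs <;> first | rfl | tauto))
        · rw [if_neg h0]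
          dsimp only
          rw [if_neg Bool.false_ne_true]
          rw [hpost (ll+1) (m.map (fun row => row ++ [-1])) f' (by omega) hlen2 hrows2
                (by rw [hcolm2]; intro v hv
                    have hveq := List.eq_of_mem_replicate hv
                    subst hveq; exact ⟨by omega, by omega⟩),
              hcolm2]
          all_goals (first | rfl | (split_ifs <;> first | rfl | tauto))

-- ===== VERDICT (by name: the statement is the Claim_ definition above) =====
theorem diguipd_spec : Claim_equal_diguipd := by
  intro k sample R _ hpre
  unfold Spec_diguipd diguipd diguipd_alt
  by_cases hs : sample = []
  · have hk : k = [] := by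
      rcases hpre with h | h
      · exact absurd hs h
      · exact h
    subst hs hk
    rfl
  · have hcol : colm (List.replicate sample.length [-1]) 0 = List.replicate sample.length (-1) := by
      simp [colm, List.map_replicate]
    have hmain := main_eq k sample R hs k.length 0 0 (List.replicate sample.length [-1]) 0
        (2*k.length+1) (by omega) (by omega) (by simp)
        (by intro row hrow
            have hveq := List.eq_of_mem_replicate hrow
            subst hveq; rfl)
        (by rw [hcol]
            intro v hv
            have hveq := List.eq_of_mem_replicate hv
            subst hveq; exact ⟨le_refl _, by omega⟩)
        (by rw [hcol, getD_replicate'])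
    rw [hmain, hcol]
    simp
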